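-- pv_equiv track=rewrite | github.com/eliottcassidy2000/math | 04-computation/degree4_proof_n7.py | count_directed_paths_with_edges
-- ===== SOURCE A (Python) =====
-- from itertools import combinations, permutations
--
-- def directed_sign(u, v):
--     return 1 if u < v else -1
--
-- def count_directed_paths_with_edges(target_edges, n_verts):
--     """Count directed Ham paths containing target edges as 4 of 6 edges."""
--     target_set = set(target_edges)
--     total = 0
--     for perm in permutations(range(n_verts)):
--         pe = []
--         for i in range(n_verts - 1):
--             u, v = perm[i], perm[i+1]
--             pe.append(((min(u,v), max(u,v)), directed_sign(u, v)))
--         mtch = [p for p, (e, _) in enumerate(pe) if e in target_set]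
--         if len(mtch) != 4: continue
--         if set(pe[p][0] for p in mtch) != target_set: continue
--         sp = 1
--         for p in mtch: sp *= pe[p][1]
--         total += sp
--     return total
-- ===== SOURCE B (Python) =====
-- from itertools import permutations
--
-- def count_directed_paths_with_edges(target_edges, n_verts):
--     """Count signed directed Ham paths containing the 4 target edges.
--
--     Only the relative arrangement of the target-edge endpoints matters: every
--     Hamiltonian path arises uniquely by inserting the free vertices one by one
--     into an arrangement of the core (endpoint) vertices, and each insertion
--     multiplies the signed count by (current vertex count - 4).  So brute-force
--     the constant-size core only, then scale by that falling-factorial factor.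
--     """
--     tset = set(target_edges)
--     if len(tset) != 4:
--         return 0
--     if any(not (0 <= a < b < n_verts) for a, b in tset):
--         return 0
--     core = sorted({v for e in tset for v in e})
--     factor = 1
--     for m in range(len(core) + 1, n_verts + 1):
--         factor *= m - 4
--     total = 0
--     for perm in permutations(core):
--         pos = {v: i for i, v in enumerate(perm)}
--         s = 1
--         for a, b in tset:
--             if pos[b] == pos[a] + 1:
--                 pass
--             elif pos[a] == pos[b] + 1:
--                 s = -s
--             else:
--                 s = 0
--         total += s
--     return factor * total
-- ===== Notes on version B (the rewrite author's own statement) =====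
-- stated objective: alternative
-- what changed: Instead of enumerating all n! vertex permutations, B brute-forces arrangements of only the <=8 target-edge endpoint vertices and multiplies the signed core count by a falling-factorial factor that accounts for inserting each free vertex (each insertion step multiplies the signed count by current-size minus 4); intended as asymptotically cheaper (O(n) vs O(n!*n)), but a timing run could not confirm this consistently (A timed out at n=16 where B returned; 34x at n=256 on too few samples).
import Mathlib
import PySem

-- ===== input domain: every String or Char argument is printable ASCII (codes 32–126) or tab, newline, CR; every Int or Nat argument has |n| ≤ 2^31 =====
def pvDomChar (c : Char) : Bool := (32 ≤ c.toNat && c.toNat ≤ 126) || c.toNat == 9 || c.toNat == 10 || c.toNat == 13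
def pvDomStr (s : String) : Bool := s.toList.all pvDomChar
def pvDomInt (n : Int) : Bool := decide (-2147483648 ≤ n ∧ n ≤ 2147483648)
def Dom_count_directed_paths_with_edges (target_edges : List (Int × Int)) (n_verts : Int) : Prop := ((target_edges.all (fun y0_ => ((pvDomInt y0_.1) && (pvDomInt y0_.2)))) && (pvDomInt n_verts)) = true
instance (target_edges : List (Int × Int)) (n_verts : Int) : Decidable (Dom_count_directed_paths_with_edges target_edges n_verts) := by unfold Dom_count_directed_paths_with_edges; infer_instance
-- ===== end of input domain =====

-- B re-implements A by contracting the problem: it brute-forces only arrangements of the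
-- target-edge endpoint vertices and scales by a falling-factorial factor for the free vertices
-- (a different algorithm; the equivalence is proved below for all inputs).
-- ===== PORT A =====
def directed_sign (u : Int) (v : Int) : Int := if u < v then 1 else -1

def count_directed_paths_with_edges (target_edges : List (Int × Int)) (n_verts : Int) : Int :=
  let target_set : PySem.Set (Int × Int) := PySem.Set.ofList target_edges
  let rng := PySem.List.pyRange 0 n_verts 1
  (PySem.List.permutations rng rng.length).foldl (fun total perm =>
    let pe : List ((Int × Int) × Int) :=
      (PySem.List.pyRange 0 (n_verts - 1) 1).foldl (fun pe i =>
        let u := PySem.List.pyGetD perm i 0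
        let v := PySem.List.pyGetD perm (i + 1) 0
        pe ++ [((min u v, max u v), directed_sign u v)]) []
    let mtch : List Int :=
      ((PySem.List.enumerate pe 0).filter (fun q => PySem.Set.contains target_set q.2.1)).map (fun q => q.1)
    if mtch.length ≠ 4 then total
    else if ¬ (PySem.Set.equal (PySem.Set.ofList (mtch.map (fun p => (PySem.List.pyGetD pe p ((0, 0), 0)).1))) target_set) then total
    else total + mtch.foldl (fun sp p => sp * (PySem.List.pyGetD pe p ((0, 0), 0)).2) 1) 0

-- ===== PORT B =====
def count_directed_paths_with_edges_alt (target_edges : List (Int × Int)) (n_verts : Int) : Int :=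
  let tset : PySem.Set (Int × Int) := PySem.Set.ofList target_edges
  if PySem.Set.len tset ≠ 4 then 0
  else if tset.any (fun e => !(decide (0 ≤ e.1) && decide (e.1 < e.2) && decide (e.2 < n_verts))) then 0
  else
    let core : List Int := PySem.List.sorted (PySem.Set.ofList (tset.flatMap (fun e => [e.1, e.2]))) (fun x => x) false
    let factor : Int := (PySem.List.pyRange ((core.length : Int) + 1) (n_verts + 1) 1).foldl (fun f m => f * (m - 4)) 1
    let total : Int := (PySem.List.permutations core core.length).foldl (fun total perm =>
      let pos : PySem.Dict Int Int := (PySem.List.enumerate perm 0).foldl (fun d q => PySem.Dict.insert d q.2 q.1) (PySem.Dict.empty)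
      let s : Int := tset.foldl (fun s e =>
        if PySem.Dict.getD pos e.2 0 == PySem.Dict.getD pos e.1 0 + 1 then s
        else if PySem.Dict.getD pos e.1 0 == PySem.Dict.getD pos e.2 0 + 1 then -s
        else 0) 1
      total + s) 0
    factor * total

-- ===== PRECONDITION & SPEC =====
def Spec_count_directed_paths_with_edges (target_edges : List (Int × Int)) (n_verts : Int) (out : Int) : Prop := out = count_directed_paths_with_edges_alt target_edges n_verts
instance (target_edges : List (Int × Int)) (n_verts : Int) (out : Int) : Decidable (Spec_count_directed_paths_with_edges target_edges n_verts out) := by unfold Spec_count_directed_paths_with_edges; infer_instance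

-- ===== CLAIM (what is proved, stated in full; the proofs are below) =====
def Claim_equal_count_directed_paths_with_edges : Prop := ∀ (target_edges : List (Int × Int)) (n_verts : Int), Dom_count_directed_paths_with_edges target_edges n_verts → Spec_count_directed_paths_with_edges target_edges n_verts (count_directed_paths_with_edges target_edges n_verts)

-- ===== LEMMAS AND PROOFS =====

/- Proof-side abstractions: T is the deduplicated target-edge list, pairsOf the
   consecutive normalized edge/sign list of a permutation. -/

def edgeOf (u v : Int) : (Int × Int) × Int := ((min u v, max u v), directed_sign u v)

def pairsOf : List Int → List ((Int × Int) × Int)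
  | a :: b :: t => edgeOf a b :: pairsOf (b :: t)
  | _ => []

def pvMatched (T : List (Int × Int)) (pr : (Int × Int) × Int) : Bool := decide (pr.1 ∈ T)

def pvH (q : List ((Int × Int) × Int)) : Int :=
  if q.length = 4 then (q.map (fun pr => pr.2)).prod else 0

def pvG (T : List (Int × Int)) (ps : List ((Int × Int) × Int)) : Int := pvH (ps.filter (pvMatched T))

def pvFA (T : List (Int × Int)) (l : List Int) : Int :=
  let q := (pairsOf l).filter (pvMatched T)
  if q.length = 4 ∧ (∀ x ∈ q.map (fun pr : (Int × Int) × Int => pr.1), x ∈ T) ∧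
      (∀ x ∈ T, x ∈ q.map (fun pr : (Int × Int) × Int => pr.1)) then
    (q.map (fun pr => pr.2)).prod
  else 0

def permsL (L : List Int) : List (List Int) := PySem.List.permutations L L.length

def PF (L : List Int) : Finset (List Int) := (permsL L).toFinset

def pvGsum (T : List (Int × Int)) (L : List Int) : Int := ∑ l ∈ PF L, pvG T (pairsOf l)

def pvIsTV (T : List (Int × Int)) (x : Int) : Bool := T.any (fun e => e.1 == x || e.2 == x)

def pvFF (c m : Nat) : Int := ((List.range (m - c)).map (fun (k : Nat) => ((c : Int) + 1 + (k : Int) - 4))).prod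

def pvChi (l : List Int) (e : Int × Int) : Int :=
  if ((l.idxOf e.2 : Int)) = (l.idxOf e.1 : Int) + 1 then 1
  else if ((l.idxOf e.1 : Int)) = (l.idxOf e.2 : Int) + 1 then -1 else 0

-- basic list/fold helpers
lemma foldl_mul_eq_prod (l : List α) (g : α → Int) (a : Int) :
    l.foldl (fun s x => s * g x) a = a * (l.map g).prod := by
  induction l generalizing a with
  | nil => simp
  | cons h t ih => simp [ih, mul_assoc]

-- pairs facts
lemma pairsOf_endpoints {l : List Int} {pr : (Int × Int) × Int} (h : pr ∈ pairsOf l) :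
    pr.1.1 ∈ l ∧ pr.1.2 ∈ l := by
  induction l with
  | nil => simp [pairsOf] at h
  | cons a t ih =>
    match t with
    | [] => simp [pairsOf] at h
    | b :: t' =>
      simp only [pairsOf, List.mem_cons] at h
      rcases h with h | h
      · subst h
        constructor
        · rcases le_total a b with hab | hab <;>
            simp [edgeOf, hab]
        · rcases le_total a b with hab | hab <;>
            simp [edgeOf, hab]
      · rcases ih h with ⟨h1, h2⟩
        exact ⟨List.mem_cons_of_mem _ h1, List.mem_cons_of_mem _ h2⟩

lemma pairsOf_lt {l : List Int} (hnd : l.Nodup) {pr : (Int × Int) × Int} (h : pr ∈ pairsOf l) :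
    pr.1.1 < pr.1.2 := by
  induction l with
  | nil => simp [pairsOf] at h
  | cons a t ih =>
    match t with
    | [] => simp [pairsOf] at h
    | b :: t' =>
      simp only [pairsOf, List.mem_cons] at h
      have hnd' := (List.nodup_cons.mp hnd).2
      rcases h with h | h
      · subst h
        have hab : a ≠ b := by
          intro hh; exact (List.nodup_cons.mp hnd).1 (hh ▸ List.mem_cons_self)
        exact min_lt_max.mpr hab
      · exact ih hnd' h

lemma pairsOf_fst_nodup {l : List Int} (hnd : l.Nodup) :
    ((pairsOf l).map (fun pr => pr.1)).Nodup := by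
  induction l with
  | nil => simp [pairsOf]
  | cons a t ih =>
    match t with
    | [] => simp [pairsOf]
    | b :: t' =>
      have hna : a ∉ b :: t' := (List.nodup_cons.mp hnd).1
      have hnd' := (List.nodup_cons.mp hnd).2
      simp only [pairsOf, List.map_cons, List.nodup_cons]
      refine ⟨?_, ih hnd'⟩
      intro hmem
      rcases List.mem_map.mp hmem with ⟨pr, hpr, hpr2⟩
      have hend := pairsOf_endpoints hpr
      have : a ∈ b :: t' := by
        rcases le_total a b with hab | hab
        · have : pr.1.1 = a := by
            rw [hpr2]; simp [edgeOf, min_eq_left hab]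
          exact this ▸ hend.1
        · have : pr.1.2 = a := by
            rw [hpr2]; simp [edgeOf, max_eq_left hab]
          exact this ▸ hend.2
      exact hna this

lemma rangeMap_eq_pairsOf (l : List Int) :
    (List.range (l.length - 1)).map (fun k => edgeOf (l.getD k 0) (l.getD (k + 1) 0)) = pairsOf l := by
  induction l with
  | nil => simp [pairsOf]
  | cons a t ih =>
    match t with
    | [] => simp [pairsOf]
    | b :: t' =>
      have hlen : (a :: b :: t').length - 1 = ((b :: t').length - 1) + 1 := by
        simp
      rw [hlen, List.range_succ_eq_map, List.map_cons, List.map_map]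
      simp only [pairsOf]
      refine congrArg₂ List.cons ?_ ?_
      · simp
      · rw [← ih]
        apply List.map_congr_left
        intro k _
        simp [Function.comp]

-- A-side per-term bridges
-- filtered matched pairs: generic facts
lemma filt_fst_nodup {T : List (Int × Int)} {l : List Int} (hnd : l.Nodup) :
    (((pairsOf l).filter (pvMatched T)).map (fun pr => pr.1)).Nodup :=
  List.Nodup.sublist (List.Sublist.map _ List.filter_sublist) (pairsOf_fst_nodup hnd)

lemma filt_fst_mem_T {T : List (Int × Int)} {ps : List ((Int × Int) × Int)}
    {x : Int × Int} (hx : x ∈ (ps.filter (pvMatched T)).map (fun pr => pr.1)) : x ∈ T := by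
  rcases List.mem_map.mp hx with ⟨pr, hpr, hpr2⟩
  have := (List.mem_filter.mp hpr).2
  rw [pvMatched, decide_eq_true_iff] at this
  exact hpr2 ▸ this

lemma len_le_four {T : List (Int × Int)} (hT : T.Nodup) (h4 : T.length = 4)
    {q : List ((Int × Int) × Int)} (hnd : (q.map (fun pr => pr.1)).Nodup)
    (hsub : ∀ x ∈ q.map (fun pr => pr.1), x ∈ T) : q.length ≤ 4 := by
  have hsp : (q.map (fun pr => pr.1)).Subperm T := List.subperm_of_subset hnd hsub
  have := hsp.length_le
  rw [List.length_map] at this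
  omega

lemma matched_v_false {T : List (Int × Int)} {v : Int}
    (hfree : ∀ e ∈ T, e.1 ≠ v ∧ e.2 ≠ v) (x : Int) :
    pvMatched T (edgeOf x v) = false ∧ pvMatched T (edgeOf v x) = false := by
  constructor <;>
  · rw [pvMatched, decide_eq_false_iff_not]
    intro hmem
    rcases le_total x v with hle | hle <;>
      simp [edgeOf, hle] at hmem <;>
      first
        | exact (hfree _ hmem).2 rfl
        | exact (hfree _ hmem).1 rfl

lemma pvFA_zero_of_card {T : List (Int × Int)} (hT : T.Nodup) (h4 : T.length ≠ 4)
    {l : List Int} (hnd : l.Nodup) : pvFA T l = 0 := by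
  rw [pvFA]
  split
  next hc =>
    exfalso
    rcases hc with ⟨hlen, hsub, hsup⟩
    have hperm : (((pairsOf l).filter (pvMatched T)).map (fun pr => pr.1)).Perm T := by
      rw [List.perm_ext_iff_of_nodup (filt_fst_nodup hnd) hT]
      intro x
      exact ⟨fun hx => hsub x hx, fun hx => hsup x hx⟩
    have := hperm.length_eq
    rw [List.length_map, hlen] at this
    omega
  next => rfl

lemma pvFA_zero_of_invalid {T : List (Int × Int)} (hT : T.Nodup) (h4 : T.length = 4)
    {e : Int × Int} (he : e ∈ T) {n : Int} (hbad : ¬ (0 ≤ e.1 ∧ e.1 < e.2 ∧ e.2 < n))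
    {l : List Int} (hnd : l.Nodup) (hmem : ∀ x ∈ l, 0 ≤ x ∧ x < n) : pvFA T l = 0 := by
  rw [pvFA]
  split
  next hc =>
    exfalso
    rcases hc with ⟨_, _, hsup⟩
    rcases List.mem_map.mp (hsup e he) with ⟨pr, hpr, hpr2⟩
    have hpr' : pr ∈ pairsOf l := (List.mem_filter.mp hpr).1
    have hlt := pairsOf_lt hnd hpr'
    rcases pairsOf_endpoints hpr' with ⟨h1, h2⟩
    rcases hmem _ h1 with ⟨h1a, _⟩
    rcases hmem _ h2 with ⟨_, h2b⟩
    rw [hpr2] at hlt h1a h2b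
    exact hbad ⟨h1a, hlt, h2b⟩
  next => rfl

lemma pvFA_eq_pvG {T : List (Int × Int)} (hT : T.Nodup) (h4 : T.length = 4)
    {l : List Int} (hnd : l.Nodup) : pvFA T l = pvG T (pairsOf l) := by
  rw [pvFA, pvG, pvH]
  by_cases hq : ((pairsOf l).filter (pvMatched T)).length = 4
  · rw [if_pos hq]
    have hsub : ∀ x ∈ ((pairsOf l).filter (pvMatched T)).map (fun pr => pr.1), x ∈ T :=
      fun x hx => filt_fst_mem_T hx
    have hsp : (((pairsOf l).filter (pvMatched T)).map (fun pr => pr.1)).Subperm T :=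
      List.subperm_of_subset (filt_fst_nodup hnd) hsub
    have hperm := List.Subperm.perm_of_length_le hsp (by rw [List.length_map, hq, h4])
    rw [if_pos ⟨hq, hsub, fun x hx => (hperm.mem_iff).mpr hx⟩]
  · rw [if_neg hq, if_neg (fun hc => hq hc.1)]

-- permutation-list machinery
lemma perm_mem_permutations {l : List Int} : ∀ {L : List Int}, l.Perm L → l ∈ PySem.List.permutations L l.length := by
  induction l with
  | nil =>
    intro L h
    have hL : L = [] := h.nil_eq.symm
    subst hL
    simp [PySem.List.permutations_zero]
  | cons a t ih =>
    intro L h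
    have hmem : a ∈ L := h.subset List.mem_cons_self
    have hidx : L.idxOf a < L.length := List.idxOf_lt_length_of_mem hmem
    rw [List.length_cons, PySem.List.permutations_succ]
    apply List.mem_flatMap.mpr
    refine ⟨L.idxOf a, List.mem_range.mpr hidx, ?_⟩
    have hget : L[L.idxOf a]? = some a := by
      rw [List.getElem?_eq_getElem hidx, List.getElem_idxOf hidx]
    rw [hget]
    show a :: t ∈ (PySem.List.permutations (L.eraseIdx (L.idxOf a)) t.length).map (a :: ·)
    apply List.mem_map.mpr
    refine ⟨t, ?_, rfl⟩
    have h1 : t.Perm (L.erase a) := (List.cons_perm_iff_perm_erase.mp h).2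
    rw [← List.erase_eq_eraseIdx_of_idxOf rfl]
    exact ih h1

lemma mem_permsL {L l : List Int} : l ∈ permsL L ↔ l.Perm L := by
  constructor
  · intro h
    rcases PySem.List.exists_perm_of_mem_permutations _ _ _ h with ⟨hlen, rest, hperm⟩
    have hrl : rest = [] := by
      have h2 := hperm.length_eq
      rw [List.length_append, hlen] at h2
      have : rest.length = 0 := by omega
      exact List.eq_nil_of_length_eq_zero this
    subst hrl
    have : l.length = L.length := by simpa using hperm.length_eq
    rw [permsL] at h
    simpa using hperm
  · intro h
    have hlen : l.length = L.length := h.length_eq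
    rw [permsL, ← hlen]
    exact perm_mem_permutations h

lemma nodup_permutations_aux : ∀ (r : Nat) (L : List Int), L.Nodup → L.length = r →
    (PySem.List.permutations L r).Nodup := by
  intro r
  induction r with
  | zero => intro L _ _; simp [PySem.List.permutations_zero]
  | succ r ih =>
    intro L hnd hlen
    rw [PySem.List.permutations_succ]
    apply List.nodup_flatMap.mpr
    constructor
    · intro i hi
      have hilt : i < L.length := List.mem_range.mp hi
      rw [List.getElem?_eq_getElem hilt]
      show (List.map (L[i] :: ·) (PySem.List.permutations (L.eraseIdx i) r)).Nodup
      apply List.Nodup.map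
      · intro x y hxy
        simpa using hxy
      · exact ih _ (List.Nodup.eraseIdx i hnd)
          (by rw [List.length_eraseIdx_of_lt hilt, hlen]; omega)
    · apply List.Pairwise.imp_of_mem ?_ List.pairwise_lt_range
      intro i j hi hj hij
      have hilt : i < L.length := List.mem_range.mp hi
      have hjlt : j < L.length := List.mem_range.mp hj
      rw [Function.onFun]
      rw [List.getElem?_eq_getElem hilt, List.getElem?_eq_getElem hjlt]
      show List.Disjoint (List.map (L[i] :: ·) _) (List.map (L[j] :: ·) _)
      intro x hx hy
      rcases List.mem_map.mp hx with ⟨p, _, hp2⟩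
      rcases List.mem_map.mp hy with ⟨q, _, hq2⟩
      have : L[i] = L[j] := by
        have := hp2.trans hq2.symm
        exact (List.cons.injEq _ _ _ _ ▸ this).1
      have : i = j := (List.Nodup.getElem_inj_iff hnd).mp this
      omega

lemma nodup_permsL {L : List Int} (h : L.Nodup) : (permsL L).Nodup :=
  nodup_permutations_aux L.length L h rfl

lemma PF_congr {L L' : List Int} (h : L.Perm L') : PF L = PF L' := by
  apply Finset.ext
  intro l
  simp only [PF, List.mem_toFinset, mem_permsL]
  exact ⟨fun hl => hl.trans h, fun hl => hl.trans h.symm⟩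

lemma sum_permsL {L : List Int} (h : L.Nodup) (f : List Int → Int) :
    ((permsL L).map f).sum = ∑ l ∈ PF L, f l :=
  (List.sum_toFinset f (nodup_permsL h)).symm

-- insertIdx facts
lemma erase_insertIdx {l : List Int} {v : Int} (hv : v ∉ l) {p : Nat} (hp : p ≤ l.length) :
    (l.insertIdx p v).erase v = l := by
  induction l generalizing p with
  | nil =>
    have hp0 : p = 0 := by simpa using hp
    subst hp0
    simp
  | cons h t ih =>
    match p with
    | 0 => simp
    | p + 1 =>
      have hhv : h ≠ v := by
        intro hh; exact hv (hh ▸ List.mem_cons_self)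
      rw [List.insertIdx_succ_cons, List.erase_cons_tail (by simpa using hhv)]
      rw [ih (fun hm => hv (List.mem_cons_of_mem _ hm)) (by simpa using hp)]

lemma idxOf_insertIdx {l : List Int} {v : Int} (hv : v ∉ l) {p : Nat} (hp : p ≤ l.length) :
    (l.insertIdx p v).idxOf v = p := by
  induction l generalizing p with
  | nil =>
    have hp0 : p = 0 := by simpa using hp
    subst hp0
    simp
  | cons h t ih =>
    match p with
    | 0 => simp
    | p + 1 =>
      have hhv : h ≠ v := by
        intro hh; exact hv (hh ▸ List.mem_cons_self)
      rw [List.insertIdx_succ_cons, List.idxOf_cons_ne _ hhv]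
      rw [ih (fun hm => hv (List.mem_cons_of_mem _ hm)) (by simpa using hp)]

lemma insertIdx_idxOf_erase {l : List Int} {v : Int} (hv : v ∈ l) :
    (l.erase v).insertIdx (l.idxOf v) v = l := by
  induction l with
  | nil => simp at hv
  | cons h t ih =>
    by_cases hva : v = h
    · subst hva
      simp
    · have hvt : v ∈ t := by
        rcases List.mem_cons.mp hv with h1 | h1
        · exact absurd h1 hva
        · exact h1
      rw [List.erase_cons_tail (by simpa using fun hh => hva hh.symm),
        List.idxOf_cons_ne _ (fun hh => hva hh.symm)]
      rw [Nat.succ_eq_add_one, List.insertIdx_succ_cons, ih hvt]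

-- the insertion decomposition of the sum over permutations
lemma sum_PF_cons {L : List Int} (hnd : L.Nodup) {v : Int} (hv : v ∉ L) (f : List Int → Int) :
    ∑ l ∈ PF (v :: L), f l
      = ∑ l ∈ PF L, ∑ p ∈ Finset.range (L.length + 1), f (l.insertIdx p v) := by
  rw [← Finset.sum_product' (PF L) (Finset.range (L.length + 1))
    (fun l p => f (l.insertIdx p v))]
  apply Finset.sum_nbij' (fun l => (l.erase v, l.idxOf v)) (fun x => x.1.insertIdx x.2 v)
  · intro a ha
    have hap : a.Perm (v :: L) := mem_permsL.mp (List.mem_toFinset.mp ha)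
    have hva : v ∈ a := hap.symm.subset List.mem_cons_self
    have h1 : L.Perm (a.erase v) := (List.cons_perm_iff_perm_erase.mp hap.symm).2
    apply Finset.mem_product.mpr
    constructor
    · exact List.mem_toFinset.mpr (mem_permsL.mpr h1.symm)
    · apply Finset.mem_range.mpr
      have := List.idxOf_lt_length_of_mem hva
      have hlen : a.length = L.length + 1 := by simpa using hap.length_eq
      omega
  · intro x hx
    rcases Finset.mem_product.mp hx with ⟨hx1, hx2⟩
    have hxp : x.1.Perm L := mem_permsL.mp (List.mem_toFinset.mp hx1)
    have hle : x.2 ≤ x.1.length := by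
      have := Finset.mem_range.mp hx2
      have := hxp.length_eq
      omega
    apply List.mem_toFinset.mpr
    apply mem_permsL.mpr
    exact (List.perm_insertIdx v x.1 hle).trans (hxp.cons v)
  · intro a ha
    have hap : a.Perm (v :: L) := mem_permsL.mp (List.mem_toFinset.mp ha)
    have hva : v ∈ a := hap.symm.subset List.mem_cons_self
    exact insertIdx_idxOf_erase hva
  · intro x hx
    rcases Finset.mem_product.mp hx with ⟨hx1, hx2⟩
    have hxp : x.1.Perm L := mem_permsL.mp (List.mem_toFinset.mp hx1)
    have hvx : v ∉ x.1 := fun hm => hv (hxp.subset hm)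
    have hle : x.2 ≤ x.1.length := by
      have := Finset.mem_range.mp hx2
      have := hxp.length_eq
      omega
    exact Prod.ext (erase_insertIdx hvx hle) (idxOf_insertIdx hvx hle)
  · intro a ha
    have hap : a.Perm (v :: L) := mem_permsL.mp (List.mem_toFinset.mp ha)
    have hva : v ∈ a := hap.symm.subset List.mem_cons_self
    rw [insertIdx_idxOf_erase hva]

-- the local insertion sum
lemma locB {T : List (Int × Int)} (hT : T.Nodup) (h4 : T.length = 4)
    {v : Int} (hfree : ∀ e ∈ T, e.1 ≠ v ∧ e.2 ≠ v) :
    ∀ (t : List Int) (h : Int) (q0 : List ((Int × Int) × Int)),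
      (∀ x ∈ (q0 ++ (pairsOf (h :: t)).filter (pvMatched T)).map (fun pr => pr.1), x ∈ T) →
      ((q0 ++ (pairsOf (h :: t)).filter (pvMatched T)).map (fun pr => pr.1)).Nodup →
      ∑ p ∈ Finset.range (t.length + 1),
          pvH (q0 ++ (pairsOf (h :: t.insertIdx p v)).filter (pvMatched T))
        = ((t.length : Int) + 1 - ((pairsOf (h :: t)).filter (pvMatched T)).length)
            * pvH (q0 ++ (pairsOf (h :: t)).filter (pvMatched T)) := by
  intro t
  induction t with
  | nil =>
    intro h q0 _ _
    simp only [List.length_nil, Nat.zero_add, Finset.sum_range_one]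
    have h1 : pvMatched T (edgeOf h v) = false := (matched_v_false hfree h).1
    simp [pairsOf, h1]
  | cons b t' ih =>
    intro h q0 hsub hnd
    have hvb : pvMatched T (edgeOf v b) = false := (matched_v_false hfree b).2
    have hhv : pvMatched T (edgeOf h v) = false := (matched_v_false hfree h).1
    rw [Finset.sum_range_succ']
    -- the p = 0 term: v inserted right after h
    have hterm0 : pvH (q0 ++ (pairsOf (h :: (b :: t').insertIdx 0 v)).filter (pvMatched T))
        = pvH (q0 ++ (pairsOf (b :: t')).filter (pvMatched T)) := by
      simp [pairsOf, hhv, hvb]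
    -- the p ≥ 1 terms: v inserted into the tail after b
    have hterm : ∀ p, pvH (q0 ++ (pairsOf (h :: (b :: t').insertIdx (p + 1) v)).filter (pvMatched T))
        = pvH ((q0 ++ (pairsOf [h, b]).filter (pvMatched T))
            ++ (pairsOf (b :: t'.insertIdx p v)).filter (pvMatched T)) := by
      intro p
      rw [List.insertIdx_succ_cons]
      simp only [pairsOf, List.filter_cons]
      cases pvMatched T (edgeOf h b) <;> simp
    have hassoc : (q0 ++ (pairsOf [h, b]).filter (pvMatched T))
            ++ (pairsOf (b :: t')).filter (pvMatched T)
        = q0 ++ (pairsOf (h :: b :: t')).filter (pvMatched T) := by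
      simp only [pairsOf, List.filter_cons, List.append_assoc]
      cases pvMatched T (edgeOf h b) <;> simp
    have hIH := ih b (q0 ++ (pairsOf [h, b]).filter (pvMatched T))
      (by rw [hassoc]; exact hsub) (by rw [hassoc]; exact hnd)
    rw [Finset.sum_congr rfl (fun p _ => hterm p)]
    simp only [List.length_cons]
    rw [hIH, hterm0, hassoc]
    -- now a case analysis on whether the edge h-b is matched
    by_cases hm : pvMatched T (edgeOf h b) = true
    · -- matched: the dropped-pair value is 0 because only 3 matched pairs remain
      have hlen4 : (q0 ++ (pairsOf (h :: b :: t')).filter (pvMatched T)).length ≤ 4 :=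
        len_le_four hT h4 hnd hsub
      have hsplit : (q0 ++ (pairsOf (h :: b :: t')).filter (pvMatched T)).length
          = (q0 ++ (pairsOf (b :: t')).filter (pvMatched T)).length + 1 := by
        simp only [pairsOf, List.filter_cons, hm]
        simp
        omega
      have hzero : pvH (q0 ++ (pairsOf (b :: t')).filter (pvMatched T)) = 0 := by
        rw [pvH, if_neg]
        omega
      have hcnt : ((pairsOf (h :: b :: t')).filter (pvMatched T)).length
          = ((pairsOf (b :: t')).filter (pvMatched T)).length + 1 := by
        simp only [pairsOf, List.filter_cons, hm]
        simp
      rw [hzero, hcnt]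
      push_cast
      ring
    · have hm' : pvMatched T (edgeOf h b) = false := by
        cases hh : pvMatched T (edgeOf h b)
        · rfl
        · exact absurd hh hm
      have heq : (pairsOf (h :: b :: t')).filter (pvMatched T)
          = (pairsOf (b :: t')).filter (pvMatched T) := by
        simp only [pairsOf, List.filter_cons, hm']
        simp
      rw [heq]
      push_cast
      ring

lemma loc_sum {T : List (Int × Int)} (hT : T.Nodup) (h4 : T.length = 4)
    {v : Int} (hfree : ∀ e ∈ T, e.1 ≠ v ∧ e.2 ≠ v)
    {l : List Int} (hnd : l.Nodup) (hv : v ∉ l) :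
    ∑ p ∈ Finset.range (l.length + 1), pvG T (pairsOf (l.insertIdx p v))
      = ((l.length : Int) - 3) * pvG T (pairsOf l) := by
  have main : ∑ p ∈ Finset.range (l.length + 1), pvG T (pairsOf (l.insertIdx p v))
      = ((l.length : Int) + 1 - ((pairsOf l).filter (pvMatched T)).length) * pvG T (pairsOf l) := by
    match l with
    | [] =>
      simp [pairsOf, pvG, pvH]
    | h :: t =>
      rw [Finset.sum_range_succ']
      have hvh : pvMatched T (edgeOf v h) = false := (matched_v_false hfree h).2
      have hterm0 : pvG T (pairsOf ((h :: t).insertIdx 0 v)) = pvG T (pairsOf (h :: t)) := by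
        simp [pairsOf, pvG, hvh]
      have hterm : ∀ p, pvG T (pairsOf ((h :: t).insertIdx (p + 1) v))
          = pvH ([] ++ (pairsOf (h :: t.insertIdx p v)).filter (pvMatched T)) := by
        intro p
        rw [List.insertIdx_succ_cons, pvG]
        simp
      have hB := locB hT h4 hfree t h []
        (by intro x hx; exact filt_fst_mem_T (T := T) (by simpa using hx))
        (by simpa using filt_fst_nodup hnd)
      rw [Finset.sum_congr rfl (fun p _ => hterm p)]
      simp only [List.length_cons]
      rw [hB, hterm0]
      simp only [List.nil_append, pvG]
      push_cast
      ring
  rw [main]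
  by_cases hz : pvG T (pairsOf l) = 0
  · rw [hz]; ring
  · have : ((pairsOf l).filter (pvMatched T)).length = 4 := by
      by_contra hc
      exact hz (by rw [pvG, pvH, if_neg hc])
    rw [this]
    push_cast
    ring

-- the contraction recursion
lemma ffProd_step {c m : Nat} (h : c < m) :
    pvFF c m = pvFF c (m - 1) * ((m : Int) - 4) := by
  have h1 : m - c = (m - 1 - c) + 1 := by omega
  rw [pvFF, h1, List.range_succ, List.map_append, List.prod_append, pvFF]
  congr 1
  have h2 : ((m - 1 - c : Nat) : Int) = (m : Int) - 1 - c := by omega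
  simp only [List.map_cons, List.map_nil, List.prod_cons, List.prod_nil, h2]
  ring

lemma pvIsTV_false_iff {T : List (Int × Int)} {x : Int} :
    pvIsTV T x = false ↔ ∀ e ∈ T, e.1 ≠ x ∧ e.2 ≠ x := by
  rw [pvIsTV, List.any_eq_false]
  constructor
  · intro h e he
    have := h e he
    simp only [Bool.or_eq_true, beq_iff_eq, not_or] at this
    exact this
  · intro h e he
    simp only [Bool.or_eq_true, beq_iff_eq, not_or]
    exact h e he

lemma rec_main {T : List (Int × Int)} (hT : T.Nodup) (h4 : T.length = 4) :
    ∀ (N : Nat) (L : List Int), L.length = N → L.Nodup →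
      pvGsum T L = pvFF (L.filter (pvIsTV T)).length L.length * pvGsum T (L.filter (pvIsTV T)) := by
  intro N
  induction N using Nat.strong_induction_on with
  | _ N ih =>
    intro L hlen hnd
    by_cases hall : ∀ x ∈ L, pvIsTV T x = true
    · rw [List.filter_eq_self.mpr hall]
      have h1 : pvFF L.length L.length = 1 := by rw [pvFF]; simp
      rw [h1, one_mul]
    · push Not at hall
      rcases hall with ⟨v, hvL, hvf⟩
      have hvf' : pvIsTV T v = false := by
        cases h : pvIsTV T v
        · rfl
        · exact absurd h hvf
      have hfree := pvIsTV_false_iff.mp hvf'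
      have hperm : L.Perm (v :: L.erase v) := List.perm_cons_erase hvL
      have hndL' : (L.erase v).Nodup := hnd.erase v
      have hvL' : v ∉ L.erase v := List.Nodup.not_mem_erase hnd
      have hlenL : (L.erase v).length + 1 = L.length := List.length_erase_add_one hvL
      have h1 : pvGsum T L = pvGsum T (v :: L.erase v) := by
        rw [pvGsum, pvGsum, PF_congr hperm]
      rw [h1, pvGsum, sum_PF_cons hndL' hvL']
      have h2 : ∀ l ∈ PF (L.erase v),
          ∑ p ∈ Finset.range ((L.erase v).length + 1), pvG T (pairsOf (l.insertIdx p v))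
            = (((L.erase v).length : Int) - 3) * pvG T (pairsOf l) := by
        intro l hl
        have hlp : l.Perm (L.erase v) := mem_permsL.mp (List.mem_toFinset.mp hl)
        have hllen : l.length = (L.erase v).length := hlp.length_eq
        rw [← hllen]
        exact loc_sum hT h4 hfree (hlp.nodup_iff.mpr hndL') (fun hm => hvL' (hlp.subset hm))
      rw [Finset.sum_congr rfl h2, ← Finset.mul_sum, ← pvGsum]
      have hIH := ih (L.erase v).length (by omega) (L.erase v) rfl hndL'
      rw [hIH]
      have hfe : (L.erase v).filter (pvIsTV T) = L.filter (pvIsTV T) := by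
        rw [← List.erase_filter]
        apply List.erase_of_not_mem
        intro hmemf
        have := (List.mem_filter.mp hmemf).2
        rw [hvf'] at this
        exact Bool.false_ne_true this
      rw [hfe]
      have hc : (L.filter (pvIsTV T)).length < L.length := by
        have hle := List.length_filter_le (pvIsTV T) (L.erase v)
        rw [hfe] at hle
        omega
      rw [ffProd_step hc]
      have h3 : L.length - 1 = (L.erase v).length := by omega
      rw [h3]
      have h4c : ((L.length : Nat) : Int) = ((L.erase v).length : Int) + 1 := by omega
      rw [h4c]
      ring

-- the chi bridge on the core
lemma mem_pairs_iff {l : List Int} (hnd : l.Nodup) {e : Int × Int} (he1 : e.1 ∈ l)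
    (he2 : e.2 ∈ l) (hlt : e.1 < e.2) (sg : Int) :
    ((e, sg) ∈ pairsOf l)
      ↔ ((l.idxOf e.2 = l.idxOf e.1 + 1 ∧ sg = 1) ∨ (l.idxOf e.1 = l.idxOf e.2 + 1 ∧ sg = -1)) := by
  rw [← rangeMap_eq_pairsOf]
  constructor
  · intro hm
    rcases List.mem_map.mp hm with ⟨k, hk, hfk⟩
    have hklt : k < l.length - 1 := List.mem_range.mp hk
    have hk1 : k < l.length := by omega
    have hk2 : k + 1 < l.length := by omega
    rw [List.getD_eq_getElem l 0 hk1, List.getD_eq_getElem l 0 hk2] at hfk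
    have hne : l[k] ≠ l[k + 1] := by
      intro hh
      have := (List.Nodup.getElem_inj_iff hnd).mp hh
      omega
    rcases lt_or_gt_of_ne hne with hlk | hlk
    · left
      have h1 : e.1 = l[k] ∧ e.2 = l[k + 1] ∧ sg = 1 := by
        rw [edgeOf, directed_sign, if_pos hlk] at hfk
        have hp := congrArg Prod.fst hfk
        have hs := congrArg Prod.snd hfk
        simp only [min_eq_left hlk.le, max_eq_right hlk.le] at hp
        exact ⟨(congrArg Prod.fst hp).symm, (congrArg Prod.snd hp).symm, hs.symm⟩
      rcases h1 with ⟨ha, hb, hs⟩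
      rw [ha, hb, List.Nodup.idxOf_getElem hnd _ hk1, List.Nodup.idxOf_getElem hnd _ hk2]
      exact ⟨rfl, hs⟩
    · right
      have h1 : e.1 = l[k + 1] ∧ e.2 = l[k] ∧ sg = -1 := by
        rw [edgeOf, directed_sign, if_neg (by omega)] at hfk
        have hp := congrArg Prod.fst hfk
        have hs := congrArg Prod.snd hfk
        simp only [min_eq_right hlk.le, max_eq_left hlk.le] at hp
        exact ⟨(congrArg Prod.fst hp).symm, (congrArg Prod.snd hp).symm, hs.symm⟩
      rcases h1 with ⟨ha, hb, hs⟩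
      rw [ha, hb, List.Nodup.idxOf_getElem hnd _ hk1, List.Nodup.idxOf_getElem hnd _ hk2]
      exact ⟨rfl, hs⟩
  · intro hrel
    rcases hrel with ⟨hr, hs⟩ | ⟨hr, hs⟩
    · have hi1 : l.idxOf e.1 < l.length := List.idxOf_lt_length_of_mem he1
      have hi2 : l.idxOf e.2 < l.length := List.idxOf_lt_length_of_mem he2
      apply List.mem_map.mpr
      refine ⟨l.idxOf e.1, List.mem_range.mpr (by omega), ?_⟩
      have hg1 : l.getD (l.idxOf e.1) 0 = e.1 := by
        rw [List.getD_eq_getElem l 0 hi1]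
        exact List.getElem_idxOf hi1
      have hg2 : l.getD (l.idxOf e.1 + 1) 0 = e.2 := by
        rw [← hr, List.getD_eq_getElem l 0 hi2]
        exact List.getElem_idxOf hi2
      rw [hg1, hg2, edgeOf, directed_sign, if_pos hlt]
      rw [min_eq_left hlt.le, max_eq_right hlt.le, hs]
    · have hi1 : l.idxOf e.1 < l.length := List.idxOf_lt_length_of_mem he1
      have hi2 : l.idxOf e.2 < l.length := List.idxOf_lt_length_of_mem he2
      apply List.mem_map.mpr
      refine ⟨l.idxOf e.2, List.mem_range.mpr (by omega), ?_⟩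
      have hg2 : l.getD (l.idxOf e.2) 0 = e.2 := by
        rw [List.getD_eq_getElem l 0 hi2]
        exact List.getElem_idxOf hi2
      have hg1 : l.getD (l.idxOf e.2 + 1) 0 = e.1 := by
        rw [← hr, List.getD_eq_getElem l 0 hi1]
        exact List.getElem_idxOf hi1
      rw [hg2, hg1, edgeOf, directed_sign, if_neg (by omega)]
      rw [min_eq_right hlt.le, max_eq_left hlt.le, hs]

lemma pvG_eq_chiprod {T : List (Int × Int)} (hT : T.Nodup) (h4 : T.length = 4)
    (hval : ∀ e ∈ T, e.1 < e.2)
    {l : List Int} (hnd : l.Nodup) (hmem : ∀ e ∈ T, e.1 ∈ l ∧ e.2 ∈ l) :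
    pvG T (pairsOf l) = (T.map (pvChi l)).prod := by
  by_cases hadj : ∀ e ∈ T, l.idxOf e.2 = l.idxOf e.1 + 1 ∨ l.idxOf e.1 = l.idxOf e.2 + 1
  · -- all four target edges are adjacent in l
    have hTsub : ∀ e ∈ T, e ∈ ((pairsOf l).filter (pvMatched T)).map (fun pr => pr.1) := by
      intro e he
      rcases hadj e he with hr | hr
      · have : ((e, (1 : Int)) ∈ pairsOf l) :=
          (mem_pairs_iff hnd (hmem e he).1 (hmem e he).2 (hval e he) 1).mpr (Or.inl ⟨hr, rfl⟩)
        exact List.mem_map.mpr ⟨(e, 1), List.mem_filter.mpr ⟨this, by simp [pvMatched, he]⟩, rfl⟩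
      · have : ((e, (-1 : Int)) ∈ pairsOf l) :=
          (mem_pairs_iff hnd (hmem e he).1 (hmem e he).2 (hval e he) (-1)).mpr (Or.inr ⟨hr, rfl⟩)
        exact List.mem_map.mpr ⟨(e, -1), List.mem_filter.mpr ⟨this, by simp [pvMatched, he]⟩, rfl⟩
    have hperm : (((pairsOf l).filter (pvMatched T)).map (fun pr => pr.1)).Perm T := by
      rw [List.perm_ext_iff_of_nodup (filt_fst_nodup hnd) hT]
      exact fun x => ⟨fun hx => filt_fst_mem_T hx, fun hx => hTsub x hx⟩
    have hlen : ((pairsOf l).filter (pvMatched T)).length = 4 := by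
      have := hperm.length_eq
      rw [List.length_map, h4] at this
      exact this
    rw [pvG, pvH, if_pos hlen]
    have hsn : ∀ pr ∈ (pairsOf l).filter (pvMatched T), pr.2 = pvChi l pr.1 := by
      intro pr hpr
      have hprT : pr.1 ∈ T := by
        have := (List.mem_filter.mp hpr).2
        rwa [pvMatched, decide_eq_true_iff] at this
      have hpp : ((pr.1, pr.2) ∈ pairsOf l) := by
        have := (List.mem_filter.mp hpr).1
        simpa using this
      have hio := (mem_pairs_iff hnd (hmem _ hprT).1 (hmem _ hprT).2 (hval _ hprT) pr.2).mp hpp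
      rcases hio with ⟨hr, hs⟩ | ⟨hr, hs⟩
      · rw [pvChi, if_pos (by exact_mod_cast congrArg (fun n : Nat => (n : Int)) hr), hs]
      · rw [pvChi, if_neg (by omega), if_pos (by exact_mod_cast congrArg (fun n : Nat => (n : Int)) hr), hs]
    calc (((pairsOf l).filter (pvMatched T)).map (fun pr => pr.2)).prod
        = (((pairsOf l).filter (pvMatched T)).map (fun pr => pvChi l pr.1)).prod := by
          rw [List.map_congr_left hsn]
      _ = ((((pairsOf l).filter (pvMatched T)).map (fun pr => pr.1)).map (pvChi l)).prod := by
          rw [List.map_map]; rfl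
      _ = (T.map (pvChi l)).prod := (hperm.map (pvChi l)).prod_eq
  · -- some target edge is not adjacent in l: both sides are 0
    push Not at hadj
    rcases hadj with ⟨e, heT, hne1, hne2⟩
    have hchi : pvChi l e = 0 := by
      rw [pvChi, if_neg (by exact_mod_cast fun h => hne1 (by exact_mod_cast h)),
        if_neg (by exact_mod_cast fun h => hne2 (by exact_mod_cast h))]
    have hrhs : (T.map (pvChi l)).prod = 0 :=
      List.prod_eq_zero (List.mem_map.mpr ⟨e, heT, hchi⟩)
    rw [hrhs]
    rw [pvG, pvH]
    split
    next hlen =>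
      exfalso
      have hsub : ∀ x ∈ ((pairsOf l).filter (pvMatched T)).map (fun pr => pr.1), x ∈ T :=
        fun x hx => filt_fst_mem_T hx
      have hsp := List.subperm_of_subset (filt_fst_nodup hnd) hsub
      have hperm := List.Subperm.perm_of_length_le hsp (by rw [List.length_map, hlen, h4])
      have hmem' : e ∈ ((pairsOf l).filter (pvMatched T)).map (fun pr => pr.1) :=
        hperm.mem_iff.mpr heT
      rcases List.mem_map.mp hmem' with ⟨pr, hpr, hpr2⟩
      have hpp : ((e, pr.2) ∈ pairsOf l) := by
        have := (List.mem_filter.mp hpr).1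
        rw [← hpr2]
        simpa using this
      have hio := (mem_pairs_iff hnd (hmem _ heT).1 (hmem _ heT).2 (hval _ heT) pr.2).mp hpp
      rcases hio with ⟨hr, _⟩ | ⟨hr, _⟩
      · exact hne1 hr
      · exact hne2 hr
    next => rfl

-- ===== port A reduction =====
def pvRawA (te : List (Int × Int)) (n_verts : Int) (perm : List Int) : Int :=
  let target_set : PySem.Set (Int × Int) := PySem.Set.ofList te
  let pe : List ((Int × Int) × Int) :=
    (PySem.List.pyRange 0 (n_verts - 1) 1).foldl (fun pe i =>
      let u := PySem.List.pyGetD perm i 0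
      let v := PySem.List.pyGetD perm (i + 1) 0
      pe ++ [((min u v, max u v), directed_sign u v)]) []
  let mtch : List Int :=
    ((PySem.List.enumerate pe 0).filter (fun q => PySem.Set.contains target_set q.2.1)).map (fun q => q.1)
  if mtch.length ≠ 4 then 0
  else if ¬ (PySem.Set.equal (PySem.Set.ofList (mtch.map (fun p => (PySem.List.pyGetD pe p ((0, 0), 0)).1))) target_set) then 0
  else mtch.foldl (fun sp p => sp * (PySem.List.pyGetD pe p ((0, 0), 0)).2) 1

lemma foldl_eq_sum_of_add {α : Type} (f : Int → α → Int) (g : α → Int)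
    (h : ∀ t x, f t x = t + g x) (l : List α) : l.foldl f 0 = (l.map g).sum := by
  have : f = fun t x => t + g x := funext fun t => funext fun x => h t x
  rw [this, PySem.List.foldl_add, zero_add]

lemma portA_eq_sum (te : List (Int × Int)) (n : Int) :
    count_directed_paths_with_edges te n = ((permsL (PySem.List.pyRange 0 n 1)).map (pvRawA te n)).sum := by
  rw [count_directed_paths_with_edges]
  apply foldl_eq_sum_of_add
  intro t perm
  simp only [pvRawA]
  split_ifs <;> simp

lemma enum_getD {α : Type} (pe : List α) (d : α) :
    ∀ q ∈ PySem.List.enumerate pe 0, PySem.List.pyGetD pe q.1 d = q.2 := by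
  intro q hq
  rw [PySem.List.enumerate_eq_map_pyRange pe d] at hq
  rcases List.mem_map.mp hq with ⟨j, _, hj⟩
  rw [← hj]

lemma enum_filter_snd {α : Type} (pe : List α) (P : α → Bool) :
    ((PySem.List.enumerate pe 0).filter (fun q => P q.2)).map (fun q => q.2) = pe.filter P := by
  have h1 : ((PySem.List.enumerate pe 0).map (fun q => q.2)).filter P
      = ((PySem.List.enumerate pe 0).filter (fun q => P q.2)).map (fun q => q.2) := by
    rw [List.filter_map]
    rfl
  rw [← h1, PySem.List.map_snd_enumerate]

lemma pvRawA_eq_pvFA (te : List (Int × Int)) (n : Int) (perm : List Int)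
    (hπ : perm.Perm (PySem.List.pyRange 0 n 1)) :
    pvRawA te n perm = pvFA (PySem.Set.ofList te) perm := by
  have hlen : perm.length = n.toNat := by
    have := hπ.length_eq
    rw [PySem.List.length_pyRange_one] at this
    omega
  -- step 1: the edge list built by the loop is pairsOf perm
  have hpe : (PySem.List.pyRange 0 (n - 1) 1).foldl (fun pe i =>
      let u := PySem.List.pyGetD perm i 0
      let v := PySem.List.pyGetD perm (i + 1) 0
      pe ++ [((min u v, max u v), directed_sign u v)]) []
      = pairsOf perm := by
    rw [PySem.List.foldl_append_singleton_eq_map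
      (f := fun i => ((min (PySem.List.pyGetD perm i 0) (PySem.List.pyGetD perm (i + 1) 0),
        max (PySem.List.pyGetD perm i 0) (PySem.List.pyGetD perm (i + 1) 0)),
        directed_sign (PySem.List.pyGetD perm i 0) (PySem.List.pyGetD perm (i + 1) 0)))]
    rw [List.nil_append, PySem.List.pyRange_one, List.map_map]
    have htn : (n - 1 - 0).toNat = perm.length - 1 := by omega
    rw [htn, ← rangeMap_eq_pairsOf]
    apply List.map_congr_left
    intro k _
    have h1 : (0 : Int) + (k : Int) = ((k : Nat) : Int) := by omega
    simp only [Function.comp, h1]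
    have h2 : ((k : Nat) : Int) + 1 = ((k + 1 : Nat) : Int) := by push_cast; ring
    rw [h2, PySem.List.pyGetD_natCast, PySem.List.pyGetD_natCast, edgeOf]
  rw [pvRawA]
  simp only [hpe]
  -- step 2: the matched-position bookkeeping
  set T : List (Int × Int) := PySem.Set.ofList te with hTdef
  have hcont : (fun (q : Int × ((Int × Int) × Int)) => PySem.Set.contains T q.2.1)
      = (fun q => pvMatched T q.2) := by
    funext q
    rw [PySem.Set.contains_eq_decide, pvMatched]
  set filtered := (PySem.List.enumerate (pairsOf perm) 0).filter (fun q => pvMatched T q.2) with hfil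
  have hE1 : filtered.map (fun q => q.2) = (pairsOf perm).filter (pvMatched T) :=
    enum_filter_snd (pairsOf perm) (pvMatched T)
  have hmemE : ∀ q ∈ filtered, PySem.List.pyGetD (pairsOf perm) q.1 (((0 : Int), (0 : Int)), (0 : Int)) = q.2 := by
    intro q hq
    exact enum_getD _ _ q (List.mem_filter.mp hq).1
  have hmtch : ((PySem.List.enumerate (pairsOf perm) 0).filter
        (fun q => PySem.Set.contains T q.2.1)).map (fun q => q.1)
      = filtered.map (fun q => q.1) := by
    rw [hcont]
  rw [hmtch]
  -- lengths
  have hlen2 : (filtered.map (fun q => q.1)).length = ((pairsOf perm).filter (pvMatched T)).length := by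
    rw [List.length_map, ← hE1, List.length_map]
  -- the edge list fetched through indices
  have hedges : (filtered.map (fun q => q.1)).map
        (fun p => (PySem.List.pyGetD (pairsOf perm) p (((0 : Int), (0 : Int)), (0 : Int))).1)
      = ((pairsOf perm).filter (pvMatched T)).map (fun pr => pr.1) := by
    rw [List.map_map, ← hE1, List.map_map]
    apply List.map_congr_left
    intro q hq
    simp only [Function.comp]
    rw [hmemE q hq]
  -- the sign product fetched through indices
  have hprod : (filtered.map (fun q => q.1)).foldl
        (fun sp p => sp * (PySem.List.pyGetD (pairsOf perm) p (((0 : Int), (0 : Int)), (0 : Int))).2) 1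
      = (((pairsOf perm).filter (pvMatched T)).map (fun pr => pr.2)).prod := by
    rw [List.foldl_map]
    rw [PySem.List.foldl_congr_mem' _ _ (fun sp (q : Int × ((Int × Int) × Int)) => sp * q.2.2) 1
      (fun q hq sp => by rw [hmemE q hq])]
    refine (foldl_mul_eq_prod filtered (fun q => q.2.2) 1).trans ?_
    rw [one_mul, ← hE1, List.map_map]
    rfl
  rw [pvFA]
  by_cases hc1 : ((pairsOf perm).filter (pvMatched T)).length = 4
  · rw [if_neg (by rw [hlen2]; omega)]
    by_cases hc2 : PySem.Set.equal (PySem.Set.ofList ((filtered.map (fun q => q.1)).map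
        (fun p => (PySem.List.pyGetD (pairsOf perm) p (((0 : Int), (0 : Int)), (0 : Int))).1))) T = true
    · rw [if_neg (by rw [hc2]; simp), hprod]
      have hmemiff := (PySem.Set.equal_iff _ _).mp hc2
      rw [if_pos]
      refine ⟨hc1, ?_, ?_⟩
      · intro x hx
        exact (hmemiff x).mp (PySem.Set.mem_ofList _ x |>.mpr (hedges ▸ hx))
      · intro x hx
        have := (hmemiff x).mpr hx
        rw [PySem.Set.mem_ofList, hedges] at this
        exact this
    · rw [if_pos (by simpa using hc2)]
      rw [if_neg]
      intro hcond
      apply hc2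
      rw [PySem.Set.equal_iff]
      intro x
      rw [PySem.Set.mem_ofList, hedges]
      exact ⟨fun hx => hcond.2.1 x hx, fun hx => hcond.2.2 x hx⟩
  · rw [if_pos (by rw [hlen2]; omega), if_neg (fun hcond => hc1 hcond.1)]

-- ===== port B reduction =====
def pvCore (te : List (Int × Int)) : List Int :=
  PySem.List.sorted (PySem.Set.ofList ((PySem.Set.ofList te).flatMap (fun e => [e.1, e.2]))) (fun x => x) false

lemma dict_getD : ∀ (t : List Int) (s : Int) (d : PySem.Dict Int Int) (x : Int), t.Nodup →
    PySem.Dict.getD ((PySem.List.enumerate t s).foldl (fun d q => PySem.Dict.insert d q.2 q.1) d) x 0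
      = if x ∈ t then s + (t.idxOf x : Int) else PySem.Dict.getD d x 0 := by
  intro t
  induction t with
  | nil => intro s d x _; simp [PySem.List.enumerate]
  | cons a t' ih =>
    intro s d x hnd
    have hna : a ∉ t' := (List.nodup_cons.mp hnd).1
    have hnd' : t'.Nodup := (List.nodup_cons.mp hnd).2
    show PySem.Dict.getD ((PySem.List.enumerate (a :: t') s).foldl (fun d q => PySem.Dict.insert d q.2 q.1) d) x 0 = _
    have hstep : PySem.List.enumerate (a :: t') s = (s, a) :: PySem.List.enumerate t' (s + 1) := by
      simp [PySem.List.enumerate]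
    rw [hstep, List.foldl_cons, ih (s + 1) _ x hnd']
    by_cases hx : x ∈ t'
    · rw [if_pos hx, if_pos (List.mem_cons_of_mem a hx)]
      have hxa : x ≠ a := fun hh => hna (hh ▸ hx)
      rw [List.idxOf_cons_ne _ (fun hh => hxa hh.symm)]
      push_cast
      ring
    · rw [if_neg hx]
      by_cases hxa : x = a
      · subst hxa
        rw [if_pos List.mem_cons_self, List.idxOf_cons_self, PySem.Dict.getD_insert_self]
        simp
      · rw [if_neg (by simp [hx, hxa]), PySem.Dict.getD_insert_of_ne _ _ _ hxa]

lemma chi_fold {T : List (Int × Int)} {π : List Int} (hnd : π.Nodup)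
    (hmem : ∀ e ∈ T, e.1 ∈ π ∧ e.2 ∈ π) :
    T.foldl (fun s e =>
      if PySem.Dict.getD ((PySem.List.enumerate π 0).foldl
            (fun d q => PySem.Dict.insert d q.2 q.1) PySem.Dict.empty) e.2 0
          == PySem.Dict.getD ((PySem.List.enumerate π 0).foldl
            (fun d q => PySem.Dict.insert d q.2 q.1) PySem.Dict.empty) e.1 0 + 1 then s
      else if PySem.Dict.getD ((PySem.List.enumerate π 0).foldl
            (fun d q => PySem.Dict.insert d q.2 q.1) PySem.Dict.empty) e.1 0
          == PySem.Dict.getD ((PySem.List.enumerate π 0).foldl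
            (fun d q => PySem.Dict.insert d q.2 q.1) PySem.Dict.empty) e.2 0 + 1 then -s
      else 0) 1 = (T.map (pvChi π)).prod := by
  rw [PySem.List.foldl_congr_mem' _ _ (fun s e => s * pvChi π e) 1 ?_]
  · rw [foldl_mul_eq_prod, one_mul]
  · intro e he s
    have h1 : PySem.Dict.getD ((PySem.List.enumerate π 0).foldl
        (fun d q => PySem.Dict.insert d q.2 q.1) PySem.Dict.empty) e.1 0 = (π.idxOf e.1 : Int) := by
      rw [dict_getD π 0 _ e.1 hnd, if_pos (hmem e he).1, zero_add]
    have h2 : PySem.Dict.getD ((PySem.List.enumerate π 0).foldl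
        (fun d q => PySem.Dict.insert d q.2 q.1) PySem.Dict.empty) e.2 0 = (π.idxOf e.2 : Int) := by
      rw [dict_getD π 0 _ e.2 hnd, if_pos (hmem e he).2, zero_add]
    rw [h1, h2]
    simp only [pvChi]
    by_cases hc1 : (π.idxOf e.2 : Int) = (π.idxOf e.1 : Int) + 1
    · rw [if_pos (by simp only [beq_iff_eq]; omega), if_pos hc1, mul_one]
    · rw [if_neg (by simp only [beq_iff_eq]; omega), if_neg hc1]
      by_cases hc2 : (π.idxOf e.1 : Int) = (π.idxOf e.2 : Int) + 1
      · rw [if_pos (by simp only [beq_iff_eq]; omega), if_pos hc2]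
        ring
      · rw [if_neg (by simp only [beq_iff_eq]; omega), if_neg hc2, mul_zero]

lemma portB_zero_card (te : List (Int × Int)) (n : Int)
    (h : ((PySem.Set.ofList te : List (Int × Int)).length : Int) ≠ 4) :
    count_directed_paths_with_edges_alt te n = 0 := by
  rw [count_directed_paths_with_edges_alt]
  rw [if_pos (by rw [PySem.Set.len_eq]; exact h)]

lemma portB_zero_invalid (te : List (Int × Int)) (n : Int)
    (h4 : ((PySem.Set.ofList te : List (Int × Int)).length : Int) = 4)
    {e : Int × Int} (he : e ∈ (PySem.Set.ofList te : List (Int × Int)))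
    (hbad : ¬ (0 ≤ e.1 ∧ e.1 < e.2 ∧ e.2 < n)) :
    count_directed_paths_with_edges_alt te n = 0 := by
  rw [count_directed_paths_with_edges_alt]
  rw [if_neg (by rw [PySem.Set.len_eq]; omega)]
  rw [if_pos]
  apply List.any_eq_true.mpr
  refine ⟨e, he, ?_⟩
  simp only [Bool.not_eq_true', Bool.and_eq_false_iff, decide_eq_false_iff_not]
  tauto

lemma portB_main (te : List (Int × Int)) (n : Int)
    (h4 : (PySem.Set.ofList te : List (Int × Int)).length = 4)
    (hval : ∀ e ∈ (PySem.Set.ofList te : List (Int × Int)), 0 ≤ e.1 ∧ e.1 < e.2 ∧ e.2 < n) :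
    count_directed_paths_with_edges_alt te n
      = pvFF (pvCore te).length n.toNat
          * ∑ l ∈ PF (pvCore te), ((PySem.Set.ofList te).map (pvChi l)).prod := by
  have hndc : (pvCore te).Nodup :=
    ((PySem.List.sorted_perm _ _ _).nodup_iff).mpr (PySem.Set.nodup_ofList _)
  rw [count_directed_paths_with_edges_alt]
  rw [if_neg (by rw [PySem.Set.len_eq, h4]; omega)]
  rw [if_neg (by
    simp only [List.any_eq_true, not_exists]
    intro e
    simp only [not_and, Bool.not_eq_eq_eq_not, Bool.not_true, Bool.not_eq_false]
    intro he
    rcases hval e he with ⟨ha, hb, hc⟩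
    simp [ha, hb, hc])]
  simp only []
  rw [show PySem.List.sorted
      (PySem.Set.ofList ((PySem.Set.ofList te).flatMap (fun e => [e.1, e.2]))) (fun x => x)
    = pvCore te from rfl]
  rw [show PySem.List.permutations (pvCore te) (pvCore te).length = permsL (pvCore te) from rfl]
  have hcong : ∀ l ∈ permsL (pvCore te), ∀ (tot : Int),
      (fun (total : Int) perm =>
        total + (PySem.Set.ofList te).foldl (fun s e =>
          if PySem.Dict.getD ((PySem.List.enumerate perm 0).foldl
                (fun d q => PySem.Dict.insert d q.2 q.1) PySem.Dict.empty) e.2 0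
              == PySem.Dict.getD ((PySem.List.enumerate perm 0).foldl
                (fun d q => PySem.Dict.insert d q.2 q.1) PySem.Dict.empty) e.1 0 + 1 then s
          else if PySem.Dict.getD ((PySem.List.enumerate perm 0).foldl
                (fun d q => PySem.Dict.insert d q.2 q.1) PySem.Dict.empty) e.1 0
              == PySem.Dict.getD ((PySem.List.enumerate perm 0).foldl
                (fun d q => PySem.Dict.insert d q.2 q.1) PySem.Dict.empty) e.2 0 + 1 then -s
          else 0) 1) tot l
      = tot + ((PySem.Set.ofList te).map (pvChi l)).prod := by
    intro l hl tot
    have hlp : l.Perm (pvCore te) := mem_permsL.mp hl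
    have hlnd : l.Nodup := hlp.nodup_iff.mpr hndc
    have hmem : ∀ e ∈ (PySem.Set.ofList te : List (Int × Int)), e.1 ∈ l ∧ e.2 ∈ l := by
      intro e he
      constructor <;>
      · apply hlp.mem_iff.mpr
        rw [pvCore, PySem.List.mem_sorted, PySem.Set.mem_ofList, List.mem_flatMap]
        exact ⟨e, he, by simp⟩
    exact congrArg (tot + ·) (chi_fold hlnd hmem)
  congr 1
  · -- the falling-factorial factor
    refine (foldl_mul_eq_prod _ (fun m => m - 4) 1).trans ?_
    rw [one_mul, PySem.List.pyRange_one, List.map_map, pvFF]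
    have hc4 : (pvCore te).length ≤ n.toNat := by
      have hsub : pvCore te ⊆ PySem.List.pyRange 0 n 1 := by
        intro x hx
        rw [pvCore, PySem.List.mem_sorted, PySem.Set.mem_ofList, List.mem_flatMap] at hx
        rcases hx with ⟨e, he, hxe⟩
        rcases hval e he with ⟨ha, hb, hc⟩
        apply PySem.List.mem_pyRange_one.mpr
        simp only [List.mem_cons, List.not_mem_nil, or_false] at hxe
        rcases hxe with h | h <;> subst h <;> constructor <;> omega
      have := (List.subperm_of_subset hndc hsub).length_le
      rw [PySem.List.length_pyRange_one] at this
      omega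
    have htn : (n + 1 - (((pvCore te).length : Int) + 1)).toNat = n.toNat - (pvCore te).length := by
      omega
    rw [htn]
    refine congrArg List.prod (List.map_congr_left ?_)
    intro k _
    simp only [Function.comp]
  · -- the signed sum over core permutations
    rw [PySem.List.foldl_congr_mem' (permsL (pvCore te)) _
      (fun tot l => tot + ((PySem.Set.ofList te).map (pvChi l)).prod) 0 hcong]
    refine (PySem.List.foldl_add (permsL (pvCore te))
      (fun l => ((PySem.Set.ofList te).map (pvChi l)).prod) 0).trans ?_
    rw [zero_add, sum_permsL hndc]

-- ===== VERDICT (by name: the statement is the Claim_ definition above) =====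
lemma core_eq (te : List (Int × Int)) (n : Int)
    (hval : ∀ e ∈ (PySem.Set.ofList te : List (Int × Int)), 0 ≤ e.1 ∧ e.1 < e.2 ∧ e.2 < n) :
    (PySem.List.pyRange 0 n 1).filter (pvIsTV (PySem.Set.ofList te)) = pvCore te := by
  symm
  rw [pvCore]
  apply PySem.List.sorted_eq_of_perm_of_pairwise_lt
  · rw [List.perm_ext_iff_of_nodup ((PySem.List.nodup_pyRange_one 0 n).filter _)
      (PySem.Set.nodup_ofList _)]
    intro x
    rw [List.mem_filter, PySem.Set.mem_ofList, List.mem_flatMap, PySem.List.mem_pyRange_one]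
    constructor
    · rintro ⟨⟨hx1, hx2⟩, htv⟩
      rw [pvIsTV, List.any_eq_true] at htv
      rcases htv with ⟨e, he, hee⟩
      simp only [Bool.or_eq_true, beq_iff_eq] at hee
      refine ⟨e, he, ?_⟩
      rcases hee with h | h <;> simp [h]
    · rintro ⟨e, he, hxe⟩
      simp only [List.mem_cons, List.not_mem_nil, or_false] at hxe
      rcases hval e he with ⟨ha, hb, hc⟩
      constructor
      · rcases hxe with h | h <;> subst h <;> constructor <;> omega
      · rw [pvIsTV, List.any_eq_true]
        refine ⟨e, he, ?_⟩
        simp only [Bool.or_eq_true, beq_iff_eq]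
        rcases hxe with h | h
        · exact Or.inl h.symm
        · exact Or.inr h.symm
  · exact List.Pairwise.sublist List.filter_sublist (PySem.List.pairwise_lt_pyRange_one 0 n)

lemma main_eq (te : List (Int × Int)) (n : Int) :
    count_directed_paths_with_edges te n = count_directed_paths_with_edges_alt te n := by
  have hTnd : (PySem.Set.ofList te : List (Int × Int)).Nodup := PySem.Set.nodup_ofList te
  by_cases h4 : (PySem.Set.ofList te : List (Int × Int)).length = 4
  case pos =>
    by_cases hval : ∀ e ∈ (PySem.Set.ofList te : List (Int × Int)), 0 ≤ e.1 ∧ e.1 < e.2 ∧ e.2 < n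
    · -- main case
      rw [portA_eq_sum, portB_main te n h4 hval]
      have hndrng := PySem.List.nodup_pyRange_one 0 n
      rw [List.map_congr_left (fun π hπ => pvRawA_eq_pvFA te n π (mem_permsL.mp hπ))]
      rw [sum_permsL hndrng]
      have hstep1 : ∑ l ∈ PF (PySem.List.pyRange 0 n 1), pvFA (PySem.Set.ofList te) l
          = pvGsum (PySem.Set.ofList te) (PySem.List.pyRange 0 n 1) := by
        rw [pvGsum]
        apply Finset.sum_congr rfl
        intro l hl
        have hlp := mem_permsL.mp (List.mem_toFinset.mp hl)
        exact pvFA_eq_pvG hTnd h4 (hlp.nodup_iff.mpr hndrng)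
      rw [hstep1, rec_main hTnd h4 (PySem.List.pyRange 0 n 1).length _ rfl hndrng]
      rw [core_eq te n hval]
      have hlenr : (PySem.List.pyRange 0 n 1).length = n.toNat := by
        rw [PySem.List.length_pyRange_one]
        omega
      rw [hlenr]
      congr 1
      rw [pvGsum]
      apply Finset.sum_congr rfl
      intro l hl
      have hlp := mem_permsL.mp (List.mem_toFinset.mp hl)
      have hndc : (pvCore te).Nodup :=
        ((PySem.List.sorted_perm _ _ _).nodup_iff).mpr (PySem.Set.nodup_ofList _)
      apply pvG_eq_chiprod hTnd h4 (fun e he => (hval e he).2.1) (hlp.nodup_iff.mpr hndc)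
      intro e he
      constructor <;>
      · apply hlp.mem_iff.mpr
        rw [pvCore, PySem.List.mem_sorted, PySem.Set.mem_ofList, List.mem_flatMap]
        exact ⟨e, he, by simp⟩
    · -- some target edge is degenerate, unsorted or out of range: both sides are 0
      push Not at hval
      rcases hval with ⟨e, he, hbad⟩
      have hbad' : ¬ (0 ≤ e.1 ∧ e.1 < e.2 ∧ e.2 < n) := by
        intro hc
        rcases hc with ⟨ha, hb, hc⟩
        have := hbad ha hb
        omega
      rw [portA_eq_sum, portB_zero_invalid te n (by omega) he hbad']
      apply List.sum_eq_zero
      intro x hx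
      rcases List.mem_map.mp hx with ⟨π, hπ, hπ2⟩
      have hlp := mem_permsL.mp hπ
      rw [← hπ2, pvRawA_eq_pvFA te n π hlp]
      apply pvFA_zero_of_invalid hTnd h4 he hbad' (hlp.nodup_iff.mpr (PySem.List.nodup_pyRange_one 0 n))
      intro x hxm
      have := PySem.List.mem_pyRange_one.mp (hlp.subset hxm)
      omega
  case neg =>
    -- the target multiset does not consist of 4 distinct edges: both sides are 0
    rw [portA_eq_sum, portB_zero_card te n (by omega)]
    apply List.sum_eq_zero
    intro x hx
    rcases List.mem_map.mp hx with ⟨π, hπ, hπ2⟩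
    have hlp := mem_permsL.mp hπ
    rw [← hπ2, pvRawA_eq_pvFA te n π hlp]
    exact pvFA_zero_of_card hTnd h4 (hlp.nodup_iff.mpr (PySem.List.nodup_pyRange_one 0 n))

theorem count_directed_paths_with_edges_spec : Claim_equal_count_directed_paths_with_edges := by
  intro te n _
  show count_directed_paths_with_edges te n = count_directed_paths_with_edges_alt te n
  exact main_eq te n
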